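-- pv_equiv track=rewrite | github.com/MoochangPark/baekjoon | 프로그래머스/unrated/132265. 롤케이크 자르기/롤케이크 자르기.py | solution
-- ===== SOURCE A (Python) =====
-- def solution(topping):
--     answer = 0
--
--     l = {}
--     r = {}
--     for t in topping:
--         if t not in r:
--             r[t] = 1
--         else:
--             r[t] += 1
--
--     for i in range(len(topping)):
--         a = topping[i]
--         if a not in l:
--             l[a] = 1
--         else:
--             l[a] += 1
--         r[a] -=1
--         if r[a] == 0:
--             del r[a]
--         if len(l) == len(r):
--             answer += 1
--
--
--
--     return answer
-- ===== SOURCE B (Python) =====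
-- def solution(topping):
--     # suffix-distinct table: suffix holds the distinct-topping count of every
--     # suffix of `topping` (built back-to-front), then one forward pass with a
--     # growing left set compares against it.
--     suffix = [0]
--     seen = set()
--     for t in reversed(topping):
--         seen.add(t)
--         suffix.append(len(seen))
--     suffix.reverse()
--     left = set()
--     answer = 0
--     for i, t in enumerate(topping):
--         left.add(t)
--         if len(left) == suffix[i + 1]:
--             answer += 1
--     return answer
-- ===== Notes on version B (the rewrite author's own statement) =====
-- stated objective: faster
-- what changed: Replaces A's two live counter dicts (simultaneous increment/decrement with deletion of exhausted keys) by a precomputed suffix-distinct table built right-to-left plus one forward pass with a growing left set compared against the table.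
import Mathlib
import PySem

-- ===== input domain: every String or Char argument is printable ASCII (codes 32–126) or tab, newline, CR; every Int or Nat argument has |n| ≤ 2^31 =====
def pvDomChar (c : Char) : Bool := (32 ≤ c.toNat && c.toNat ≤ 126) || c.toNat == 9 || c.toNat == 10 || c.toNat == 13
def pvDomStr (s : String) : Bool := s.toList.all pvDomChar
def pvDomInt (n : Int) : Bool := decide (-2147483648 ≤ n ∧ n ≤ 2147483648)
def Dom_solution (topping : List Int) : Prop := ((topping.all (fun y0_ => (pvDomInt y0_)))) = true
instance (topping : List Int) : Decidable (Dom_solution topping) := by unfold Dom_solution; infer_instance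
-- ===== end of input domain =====

-- B replaces A's two live counter dicts by a precomputed suffix-distinct table plus one forward pass (same O(n), measured constant-factor speedup).

-- ===== PORT A =====
-- loop body of A's second loop (a = topping[i] already fetched)
def pvStepA (st : PySem.Dict Int Int × PySem.Dict Int Int × Int) (a : Int) :
    PySem.Dict Int Int × PySem.Dict Int Int × Int :=
  let l := if st.1.contains a = false then st.1.insert a 1 else st.1.insert a (st.1.getD a 0 + 1)
  let r := st.2.1.insert a (st.2.1.getD a 0 - 1)
  let r := if r.getD a 0 = 0 then r.erase a else r
  let answer := if l.size = r.size then st.2.2 + 1 else st.2.2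
  (l, r, answer)

def solution (topping : List Int) : Int :=
  let r := topping.foldl
    (fun r t => if r.contains t = false then r.insert t 1 else r.insert t (r.getD t 0 + 1))
    PySem.Dict.empty
  ((PySem.List.pyRange 0 (PySem.List.len topping)).foldl
    (fun st i => pvStepA st (PySem.List.pyGetD topping i 0))
    (PySem.Dict.empty, r, 0)).2.2

-- ===== PORT B =====
def solution_alt (topping : List Int) : Int :=
  let p := topping.reverse.foldl
    (fun (st : PySem.Set Int × List Int) t =>
      let seen := PySem.Set.add st.1 t
      (seen, st.2 ++ [PySem.Set.len seen]))
    (PySem.Set.empty, [(0 : Int)])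
  let suffix := p.2.reverse
  ((PySem.List.enumerate topping 0).foldl
    (fun (st : PySem.Set Int × Int) q =>
      let left := PySem.Set.add st.1 q.2
      (left, if PySem.Set.len left = PySem.List.pyGetD suffix (q.1 + 1) 0 then st.2 + 1 else st.2))
    (PySem.Set.empty, 0)).2

-- ===== PRECONDITION & SPEC =====
def Spec_solution (topping : List Int) (out : Int) : Prop := out = solution_alt topping
instance (topping : List Int) (out : Int) : Decidable (Spec_solution topping out) := by unfold Spec_solution; infer_instance

-- ===== CLAIM (what is proved, stated in full; the proofs are below) =====
def Claim_equal_solution : Prop := ∀ (topping : List Int), Dom_solution topping → Spec_solution topping (solution topping)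

-- ===== LEMMAS AND PROOFS =====

-- number of distinct elements of a list
def pvN (l : List Int) : Nat := (PySem.Set.ofList l).length

-- abstract count of valid cuts: prefix p already consumed, s still to process
def pvC (p s : List Int) : Int :=
  match s with
  | [] => 0
  | a :: s' => (if pvN (p ++ [a]) = pvN s' then pvC (p ++ [a]) s' + 1 else pvC (p ++ [a]) s')

theorem pv_nodup_len_eq (l1 l2 : List Int) (h1 : l1.Nodup) (h2 : l2.Nodup)
    (h : ∀ x, x ∈ l1 ↔ x ∈ l2) : l1.length = l2.length :=
  ((List.perm_ext_iff_of_nodup h1 h2).2 h).length_eq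

theorem pv_size_eq_pvN (d : PySem.Dict Int Int) (s : List Int) (hn : d.keys.Nodup)
    (hm : ∀ v, d.contains v = true ↔ v ∈ s) : d.size = pvN s := by
  have hk : d.size = d.keys.length := by
    simp [PySem.Dict.size, PySem.Dict.keys]
  rw [hk]
  exact pv_nodup_len_eq _ _ hn (PySem.Set.nodup_ofList s)
    (fun x => by rw [PySem.Set.mem_ofList]; rw [← hm x, PySem.Dict.contains_iff_mem_keys])

theorem pv_ofList_append_singleton (p : List Int) (a : Int) :
    PySem.Set.ofList (p ++ [a]) = PySem.Set.add (PySem.Set.ofList p) a := by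
  rw [PySem.Set.ofList_eq_foldl, PySem.Set.ofList_eq_foldl, List.foldl_append]
  rfl

-- facts about Dict.erase (no erase lemmas in the prelude's book)
theorem pv_get?_erase (d : PySem.Dict Int Int) (k j : Int) :
    (d.erase k).get? j = if j = k then none else d.get? j := by
  obtain ⟨items⟩ := d
  simp only [PySem.Dict.erase, PySem.Dict.get?]
  induction items with
  | nil => simp
  | cons p rest ih =>
    rw [List.filter_cons]
    by_cases hpk : p.1 = k
    · have hne : (!(p.1 == k)) = false := by simp [hpk]
      rw [hne, if_neg (by simp), ih]
      by_cases hjk : j = k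
      · simp [hjk]
      · have hpj : (p.1 == j) = false := by simp [hpk]; exact fun h => hjk h.symm
        simp only [if_neg hjk, List.find?_cons, hpj]
    · have hne : (!(p.1 == k)) = true := by simp [hpk]
      rw [hne, if_pos rfl]
      by_cases hpj : p.1 = j
      · have hjk : ¬ j = k := by rw [← hpj]; exact hpk
        simp only [if_neg hjk, List.find?_cons, hpj, beq_self_eq_true]
      · have h' : (p.1 == j) = false := by simp [hpj]
        simp only [List.find?_cons, h']
        exact ih

theorem pv_getD_erase (d : PySem.Dict Int Int) (k j v : Int) :
    (d.erase k).getD j v = if j = k then v else d.getD j v := by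
  simp only [PySem.Dict.getD, pv_get?_erase]
  split <;> rfl

theorem pv_contains_erase (d : PySem.Dict Int Int) (k j : Int) :
    (d.erase k).contains j = (!(j == k) && d.contains j) := by
  obtain ⟨items⟩ := d
  simp only [PySem.Dict.erase, PySem.Dict.contains]
  induction items with
  | nil => simp
  | cons p rest ih =>
    rw [List.filter_cons]
    by_cases hpk : p.1 = k
    · have hne : (!(p.1 == k)) = false := by simp [hpk]
      rw [hne, if_neg (by simp), ih]
      by_cases hjk : j = k
      · simp [hjk]
      · have hpj : (p.1 == j) = false := by simp [hpk]; exact fun h => hjk h.symm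
        simp [hpj]
    · have hne : (!(p.1 == k)) = true := by simp [hpk]
      rw [hne, if_pos rfl]
      by_cases hpj : p.1 = j
      · have hjk : ¬ j = k := by rw [← hpj]; exact hpk
        simp [hpj, hjk]
      · have h' : (p.1 == j) = false := by simp [hpj]
        simp [h', ih]

theorem pv_nodup_keys_erase (d : PySem.Dict Int Int) (k : Int) (h : d.keys.Nodup) :
    (d.erase k).keys.Nodup := by
  have heq : (d.erase k).keys = d.keys.filter (fun x => !(x == k)) := by
    simp only [PySem.Dict.erase, PySem.Dict.keys, List.filter_map]
    rfl
  rw [heq]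
  exact h.filter _

-- A's first loop builds Counter(topping)
theorem pv_first_loop (topping : List Int) :
    topping.foldl
      (fun r t => if r.contains t = false then r.insert t 1 else r.insert t (r.getD t 0 + 1))
      PySem.Dict.empty = PySem.Dict.counter topping := by
  have hf : (fun (r : PySem.Dict Int Int) t =>
      if r.contains t = false then r.insert t 1 else r.insert t (r.getD t 0 + 1)) =
      (fun (d : PySem.Dict Int Int) x => d.insert x (d.getD x 0 + 1)) := by
    funext r t
    by_cases h : r.contains t = false
    · simp [h, PySem.Dict.getD_of_not_contains r 0 h]
    · simp [h]
  rw [hf, PySem.Dict.foldl_insert_getD_add_one_eq_counter]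

theorem pv_A_loop (s : List Int) : ∀ (p : List Int) (l r : PySem.Dict Int Int) (ans : Int),
    l.keys.Nodup → (∀ v, l.contains v = true ↔ v ∈ p) →
    r.keys.Nodup → (∀ v, r.getD v 0 = (s.count v : Int)) → (∀ v, r.contains v = true ↔ v ∈ s) →
    (s.foldl pvStepA (l, r, ans)).2.2 = ans + pvC p s := by
  induction s with
  | nil => intro p l r ans _ _ _ _ _; simp [pvC]
  | cons a s' ih =>
    intro p l r ans hln hlm hrn hrd hrm
    rw [List.foldl_cons]
    -- the new left dict
    set l' := if l.contains a = false then l.insert a 1 else l.insert a (l.getD a 0 + 1) with hl'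
    have hl'n : l'.keys.Nodup := by
      rw [hl']; split <;> exact PySem.Dict.nodup_keys_insert _ _ _ hln
    have hl'm : ∀ v, l'.contains v = true ↔ v ∈ p ++ [a] := by
      intro v
      have : l'.contains v = (v == a || l.contains v) := by
        rw [hl']; split <;> exact PySem.Dict.contains_insert _ _ _ _
      rw [this]
      simp [hlm v, or_comm]
    -- the new right dict
    set r1 := r.insert a (r.getD a 0 - 1) with hr1
    have hr1d : ∀ v, r1.getD v 0 = if v = a then (s'.count a : Int) else (s'.count v : Int) := by
      intro v
      rw [hr1, PySem.Dict.getD_insert]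
      by_cases hva : v = a
      · subst hva
        rw [if_pos rfl, hrd v, List.count_cons_self]
        push_cast
        simp
      · rw [if_neg hva, if_neg hva, hrd v]
        norm_cast
        rw [List.count_cons]
        simp [Ne.symm hva]
    set r2 := if r1.getD a 0 = 0 then r1.erase a else r1 with hr2
    have hr1n : r1.keys.Nodup := PySem.Dict.nodup_keys_insert _ _ _ hrn
    have hr2n : r2.keys.Nodup := by
      rw [hr2]; split
      · exact pv_nodup_keys_erase _ _ hr1n
      · exact hr1n
    have hga : r1.getD a 0 = (s'.count a : Int) := by rw [hr1d a]; simp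
    have hr2d : ∀ v, r2.getD v 0 = (s'.count v : Int) := by
      intro v
      rw [hr2]
      split
      · rename_i h0
        rw [pv_getD_erase]
        by_cases hva : v = a
        · rw [if_pos hva, hva]
          rw [hga] at h0
          omega
        · rw [if_neg hva, hr1d v, if_neg hva]
      · exact by rw [hr1d v]; split <;> simp_all
    have hr2m : ∀ v, r2.contains v = true ↔ v ∈ s' := by
      intro v
      have hr1c : r1.contains v = (v == a || r.contains v) := PySem.Dict.contains_insert _ _ _ _
      rw [hr2]
      split
      · rename_i h0
        rw [hga] at h0
        have hnotin : a ∉ s' := by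
          intro hmem
          have := List.count_pos_iff.2 hmem
          omega
        rw [pv_contains_erase, hr1c]
        by_cases hva : v = a
        · rw [hva]; simp [hnotin]
        · simp [hva, hrm v]
      · rename_i h0
        rw [hga] at h0
        have hin : a ∈ s' := by
          by_cases h : s'.count a = 0
          · exact absurd (by exact_mod_cast h) h0
          · exact List.count_pos_iff.1 (Nat.pos_of_ne_zero h)
        rw [hr1c]
        by_cases hva : v = a
        · rw [hva]; simp [hin]
        · simp [hva, hrm v]
    -- sizes
    have hsl : l'.size = pvN (p ++ [a]) := pv_size_eq_pvN _ _ hl'n hl'm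
    have hsr : r2.size = pvN s' := pv_size_eq_pvN _ _ hr2n hr2m
    have hstep : pvStepA (l, r, ans) a
        = (l', r2, if pvN (p ++ [a]) = pvN s' then ans + 1 else ans) := by
      simp only [pvStepA, ← hl', ← hr1, ← hr2, hsl, hsr]
    rw [hstep, ih (p ++ [a]) l' r2 _ hl'n hl'm hr2n hr2d hr2m]
    simp only [pvC]
    split <;> ring

-- distinct counts computed along the reversed scan
def pvSizes (seen : PySem.Set Int) : List Int → List Int
  | [] => []
  | t :: ts => ((PySem.Set.add seen t).length : Int) :: pvSizes (PySem.Set.add seen t) ts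

theorem pv_fold_rev (rl : List Int) : ∀ (seen : PySem.Set Int) (acc : List Int),
    (rl.foldl
      (fun (st : PySem.Set Int × List Int) t =>
        let seen := PySem.Set.add st.1 t
        (seen, st.2 ++ [PySem.Set.len seen]))
      (seen, acc)).2 = acc ++ pvSizes seen rl := by
  induction rl with
  | nil => intro seen acc; simp [pvSizes]
  | cons t ts ih =>
    intro seen acc
    rw [List.foldl_cons]
    refine (ih (PySem.Set.add seen t) (acc ++ [PySem.Set.len (PySem.Set.add seen t)])).trans ?_
    simp [pvSizes, PySem.Set.len]

theorem pv_pvSizes_append (xs ys : List Int) : ∀ seen : PySem.Set Int,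
    pvSizes seen (xs ++ ys) = pvSizes seen xs ++ pvSizes (PySem.Set.update seen xs) ys := by
  induction xs with
  | nil => intro seen; rfl
  | cons t ts ih =>
    intro seen
    simp only [List.cons_append, pvSizes, ih (PySem.Set.add seen t)]
    rfl

theorem pv_pvN_reverse (l : List Int) :
    (PySem.Set.ofList l.reverse).length = pvN l :=
  pv_nodup_len_eq _ _ (PySem.Set.nodup_ofList _) (PySem.Set.nodup_ofList _)
    (fun x => by rw [PySem.Set.mem_ofList, PySem.Set.mem_ofList, List.mem_reverse])

theorem pv_suffix_eq (topping : List Int) :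
    ((0 : Int) :: pvSizes PySem.Set.empty topping.reverse).reverse =
      (List.range (topping.length + 1)).map (fun j => (pvN (topping.drop j) : Int)) := by
  induction topping with
  | nil => simp [pvSizes, pvN, PySem.Set.ofList]
  | cons a l' ih =>
    rw [show (a :: l').reverse = l'.reverse ++ [a] from List.reverse_cons, pv_pvSizes_append]
    have hupd : PySem.Set.update PySem.Set.empty l'.reverse = PySem.Set.ofList l'.reverse := by
      rw [PySem.Set.ofList_eq_foldl]; rfl
    have hsing : pvSizes (PySem.Set.ofList l'.reverse) [a] =
        [((PySem.Set.ofList (l'.reverse ++ [a])).length : Int)] := by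
      simp only [pvSizes]
      rw [pv_ofList_append_singleton]
    rw [hupd, hsing]
    have hrev : ((0 : Int) :: (pvSizes PySem.Set.empty l'.reverse ++
        [((PySem.Set.ofList (l'.reverse ++ [a])).length : Int)])).reverse =
        ((PySem.Set.ofList (l'.reverse ++ [a])).length : Int) ::
          ((0 : Int) :: pvSizes PySem.Set.empty l'.reverse).reverse := by
      simp
    have hhead : (PySem.Set.ofList (l'.reverse ++ [a])).length = pvN (a :: l') := by
      rw [show l'.reverse ++ [a] = (a :: l').reverse from by simp]
      exact pv_pvN_reverse (a :: l')
    rw [hrev, hhead]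
    rw [show (a :: l').length + 1 = ((l'.length + 1) + 1) from by simp, List.range_succ_eq_map]
    simp only [List.map_cons, List.drop_zero, List.map_map]
    congr 1

theorem pv_suffix_getD (topping : List Int) (j : Nat) (hj : j ≤ topping.length) :
    PySem.List.pyGetD
      ((topping.reverse.foldl
        (fun (st : PySem.Set Int × List Int) t =>
          let seen := PySem.Set.add st.1 t
          (seen, st.2 ++ [PySem.Set.len seen]))
        (PySem.Set.empty, [(0 : Int)])).2.reverse) (j : Int) 0
      = (pvN (topping.drop j) : Int) := by
  rw [pv_fold_rev]
  rw [show ([(0 : Int)] ++ pvSizes PySem.Set.empty topping.reverse) =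
    ((0 : Int) :: pvSizes PySem.Set.empty topping.reverse) from rfl]
  rw [pv_suffix_eq, PySem.List.pyGetD_natCast]
  rw [List.getD_eq_getElem _ _ (by simp; omega)]
  simp

theorem pv_B_loop (suffix full : List Int)
    (hs : ∀ j : Nat, j ≤ full.length →
      PySem.List.pyGetD suffix (j : Int) 0 = (pvN (full.drop j) : Int)) :
    ∀ (s p : List Int) (ans : Int), full = p ++ s →
    ((PySem.List.enumerate s (p.length : Int)).foldl
      (fun (st : PySem.Set Int × Int) q =>
        let left := PySem.Set.add st.1 q.2
        (left, if PySem.Set.len left = PySem.List.pyGetD suffix (q.1 + 1) 0 then st.2 + 1 else st.2))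
      (PySem.Set.ofList p, ans)).2 = ans + pvC p s := by
  intro s
  induction s with
  | nil => intro p ans _; simp [PySem.List.enumerate, pvC]
  | cons a s' ih =>
    intro p ans hfull
    rw [PySem.List.enumerate_cons, List.foldl_cons]
    have hlen1 : p.length + 1 ≤ full.length := by
      subst hfull; simp
    have hdrop : full.drop (p.length + 1) = s' := by
      subst hfull
      rw [show p ++ a :: s' = (p ++ [a]) ++ s' from by simp]
      rw [show p.length + 1 = (p ++ [a]).length from by simp]
      exact List.drop_left
    have hidx : ((p.length : Int) + 1) = ((p.length + 1 : Nat) : Int) := by push_cast; ring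
    have hcond : (PySem.Set.len (PySem.Set.add (PySem.Set.ofList p) a) =
        PySem.List.pyGetD suffix ((p.length : Int) + 1) 0) ↔
        (pvN (p ++ [a]) = pvN s') := by
      rw [hidx, hs (p.length + 1) hlen1, hdrop]
      rw [← pv_ofList_append_singleton]
      unfold PySem.Set.len pvN
      exact Int.natCast_inj
    show (List.foldl _ (PySem.Set.add (PySem.Set.ofList p) a,
      if PySem.Set.len (PySem.Set.add (PySem.Set.ofList p) a) =
          PySem.List.pyGetD suffix ((p.length : Int) + 1) 0 then ans + 1 else ans)
      (PySem.List.enumerate s' ((p.length : Int) + 1))).2 = ans + pvC p (a :: s')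
    rw [if_congr hcond rfl rfl, ← pv_ofList_append_singleton]
    rw [show ((p.length : Int) + 1) = (((p ++ [a]).length : Nat) : Int) from by simp]
    rw [ih (p ++ [a]) _ (by simp [hfull])]
    simp only [pvC]
    split <;> ring

theorem pv_A_eq (topping : List Int) : solution topping = pvC [] topping := by
  show ((PySem.List.pyRange 0 (PySem.List.len topping)).foldl
      (fun st i => pvStepA st (PySem.List.pyGetD topping i 0))
      (PySem.Dict.empty,
        topping.foldl
          (fun r t => if r.contains t = false then r.insert t 1 else r.insert t (r.getD t 0 + 1))
          PySem.Dict.empty, 0)).2.2 = pvC [] topping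
  rw [pv_first_loop, PySem.List.foldl_pyRange_zero_pyGetD topping 0 pvStepA _]
  rw [pv_A_loop topping [] PySem.Dict.empty (PySem.Dict.counter topping) 0
    (by simp [PySem.Dict.keys_empty])
    (fun v => by simp [PySem.Dict.contains_empty])
    (PySem.Dict.nodup_keys_counter topping)
    (fun v => PySem.Dict.getD_counter topping v)
    (fun v => by rw [PySem.Dict.contains_counter]; simp)]
  ring

theorem pv_B_eq (topping : List Int) : solution_alt topping = pvC [] topping := by
  show ((PySem.List.enumerate topping 0).foldl
    (fun (st : PySem.Set Int × Int) q =>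
      let left := PySem.Set.add st.1 q.2
      (left, if PySem.Set.len left =
          PySem.List.pyGetD
            ((topping.reverse.foldl
              (fun (st : PySem.Set Int × List Int) t =>
                let seen := PySem.Set.add st.1 t
                (seen, st.2 ++ [PySem.Set.len seen]))
              (PySem.Set.empty, [(0 : Int)])).2.reverse) (q.1 + 1) 0 then st.2 + 1 else st.2))
    (PySem.Set.empty, 0)).2 = pvC [] topping
  have h := pv_B_loop
    ((topping.reverse.foldl
      (fun (st : PySem.Set Int × List Int) t =>
        let seen := PySem.Set.add st.1 t
        (seen, st.2 ++ [PySem.Set.len seen]))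
      (PySem.Set.empty, [(0 : Int)])).2.reverse)
    topping (fun j hj => pv_suffix_getD topping j hj) topping [] 0 rfl
  simpa using h

-- ===== VERDICT (by name: the statement is the Claim_ definition above) =====
theorem solution_spec : Claim_equal_solution := by
  intro topping _
  unfold Spec_solution
  rw [pv_A_eq, pv_B_eq]
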